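-- pv_equiv track=rewrite | github.com/Avabowler/JumpCoder-Plugin | JumpCoder-server/utils.py | process_incoder_fill
-- ===== SOURCE A (Python) =====
-- from typing import List, Tuple
--
-- def make_sentinel_incoder(i):
--     # signals (1) a location to insert an infill and (2) the start of the infill generation
--     return f"<|mask:{i}|>\n"
--
-- def process_incoder_fill(text_list: List[str]):
--     new_text_list = []
--     for text in text_list:
--         parts = text.split("<FILL_ME>")
--         prompt = ''
--         for sentinel_ix, part in enumerate(parts):
--             prompt += part
--             if (sentinel_ix < len(parts) - 1):
--                 prompt += make_sentinel_incoder(sentinel_ix)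
--         prompt += "\n<|mask:1|><|mask:0|>"
--         new_text_list.append(prompt)
--
--     return new_text_list
-- ===== SOURCE B (Python) =====
-- from typing import List, Tuple
--
-- def make_sentinel_incoder(i):
--     # signals (1) a location to insert an infill and (2) the start of the infill generation
--     return f"<|mask:{i}|>\n"
--
-- FILL = "<FILL_ME>"
--
-- def process_incoder_fill(text_list: List[str]):
--     # single left-to-right scan: emit chars, and at each placeholder occurrence
--     # emit the next sentinel; no split, no index bookkeeping over parts
--     out = []
--     for text in text_list:
--         buf = []
--         i = 0
--         k = 0
--         n = len(text)
--         while i < n: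
--             if text.startswith(FILL, i):
--                 buf.append(make_sentinel_incoder(k))
--                 k += 1
--                 i += len(FILL)
--             else:
--                 buf.append(text[i])
--                 i += 1
--         buf.append("\n<|mask:1|><|mask:0|>")
--         out.append("".join(buf))
--     return out
-- ===== Notes on version B (the rewrite author's own statement) =====
-- stated objective: alternative
-- what changed: Replaces split('<FILL_ME>') plus an enumerate loop that re-joins the parts with index-dependent sentinels by a single left-to-right scan that emits the next sentinel whenever the placeholder starts at the current position.
import Mathlib
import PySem

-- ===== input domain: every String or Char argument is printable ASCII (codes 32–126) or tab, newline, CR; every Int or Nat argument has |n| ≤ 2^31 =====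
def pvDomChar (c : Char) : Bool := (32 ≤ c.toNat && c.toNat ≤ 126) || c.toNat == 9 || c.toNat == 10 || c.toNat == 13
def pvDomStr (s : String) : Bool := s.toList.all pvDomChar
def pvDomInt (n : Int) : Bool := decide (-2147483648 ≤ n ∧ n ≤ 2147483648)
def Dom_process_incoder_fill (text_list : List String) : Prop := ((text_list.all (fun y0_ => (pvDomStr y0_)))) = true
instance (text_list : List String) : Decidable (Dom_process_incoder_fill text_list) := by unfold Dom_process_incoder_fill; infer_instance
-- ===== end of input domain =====

-- B replaces split+enumerate by a single scan that emits sentinels in place (objective: alternative decomposition, same cost).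

-- shared helper (both Pythons define make_sentinel_incoder identically)
def make_sentinel_incoder (i : Int) : List Char :=
  "<|mask:".toList ++ PySem.Int.toChars i ++ "|>\n".toList

-- ===== PORT A =====
def process_incoder_fill (text_list : List String) : List String :=
  text_list.foldl (fun new_text_list text =>
    let parts := PySem.Chars.splitOn text.toList "<FILL_ME>".toList
    let prompt :=
      (PySem.List.enumerate parts).foldl (fun prompt p =>
        let prompt := prompt ++ p.2
        if p.1 < (parts.length : Int) - 1 then prompt ++ make_sentinel_incoder p.1
        else prompt) []
    new_text_list ++ [String.ofList (prompt ++ "\n<|mask:1|><|mask:0|>".toList)]) []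

-- ===== PORT B =====
def pvFill : List Char := "<FILL_ME>".toList

-- the `while i < n` scan of Source B: startswith at the cursor → sentinel, else copy one char
def pvScan (text : List Char) (k : Int) : List Char :=
  match text with
  | [] => []
  | c :: rest =>
    if PySem.Chars.startswith (c :: rest) pvFill then
      make_sentinel_incoder k ++ pvScan (List.drop pvFill.length (c :: rest)) (k + 1)
    else c :: pvScan rest k
termination_by text.length
decreasing_by
  · simp [pvFill]
  · simp

def process_incoder_fill_alt (text_list : List String) : List String :=
  text_list.foldl (fun out text =>
    out ++ [String.ofList (pvScan text.toList 0 ++ "\n<|mask:1|><|mask:0|>".toList)]) []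

-- ===== PRECONDITION & SPEC =====
def Spec_process_incoder_fill (text_list : List String) (out : List String) : Prop := out = process_incoder_fill_alt text_list
instance (text_list : List String) (out : List String) : Decidable (Spec_process_incoder_fill text_list out) := by unfold Spec_process_incoder_fill; infer_instance

-- ===== CLAIM (what is proved, stated in full; the proofs are below) =====
def Claim_equal_process_incoder_fill : Prop := ∀ (text_list : List String), Dom_process_incoder_fill text_list → Spec_process_incoder_fill text_list (process_incoder_fill text_list)

-- ===== LEMMAS AND PROOFS =====

-- clean structural recursion computing splitOn on "<FILL_ME>"
def mySplit (l : List Char) : List (List Char) :=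
  match l with
  | [] => [[]]
  | c :: rest =>
    if pvFill.isPrefixOf (c :: rest) then [] :: mySplit (List.drop pvFill.length (c :: rest))
    else (mySplit rest).modifyHead (c :: ·)
termination_by l.length
decreasing_by
  · simp [pvFill]
  · simp

theorem mySplit_nil : mySplit [] = [[]] := by rw [mySplit]

theorem mySplit_cons (c : Char) (rest : List Char) :
    mySplit (c :: rest)
      = if pvFill.isPrefixOf (c :: rest) then [] :: mySplit (List.drop pvFill.length (c :: rest))
        else (mySplit rest).modifyHead (c :: ·) := by
  rw [mySplit.eq_def]

theorem pvScan_nil (k : Int) : pvScan [] k = [] := by rw [pvScan]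

theorem pvScan_cons (c : Char) (rest : List Char) (k : Int) :
    pvScan (c :: rest) k
      = if PySem.Chars.startswith (c :: rest) pvFill then
          make_sentinel_incoder k ++ pvScan (List.drop pvFill.length (c :: rest)) (k + 1)
        else c :: pvScan rest k := by
  rw [pvScan.eq_def]

theorem mySplit_ne_nil (l : List Char) : mySplit l ≠ [] := by
  induction l using mySplit.induct with
  | case1 => simp [mySplit_nil]
  | case2 c rest hp ih => rw [mySplit_cons, if_pos hp]; simp
  | case3 c rest hp ih =>
    rw [mySplit_cons, if_neg hp]
    rcases h : mySplit rest with _ | ⟨p, ps⟩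
    · exact absurd h ih
    · simp [List.modifyHead]

theorem go_eq (fuel : Nat) : ∀ (l cur : List Char) (acc : List (List Char)),
    l.length ≤ fuel →
    PySem.Chars.splitOn.go pvFill fuel l cur acc
      = acc.reverse ++ (mySplit l).modifyHead (cur.reverse ++ ·) := by
  induction fuel with
  | zero =>
    intro l cur acc h
    have : l = [] := List.length_eq_zero_iff.mp (Nat.le_zero.mp h)
    subst this
    simp [PySem.Chars.splitOn.go, mySplit_nil]
  | succ fuel ih =>
    intro l cur acc h
    match l with
    | [] => simp [PySem.Chars.splitOn.go, mySplit_nil]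
    | c :: rest =>
      rw [PySem.Chars.splitOn.go]
      by_cases hp : pvFill.isPrefixOf (c :: rest)
      · rw [if_pos hp]
        rw [ih _ _ _ (by have h9 : pvFill.length = 9 := rfl; simp [h9] at h ⊢; omega)]
        rw [mySplit_cons, if_pos hp]
        rcases hq : mySplit (List.drop pvFill.length (c :: rest)) with _ | ⟨p, ps⟩
        · exact absurd hq (mySplit_ne_nil _)
        · simp [List.modifyHead]
      · rw [if_neg hp]
        rw [ih _ _ _ (by simp at h ⊢; omega)]
        rw [mySplit_cons, if_neg hp]
        rcases mySplit rest with _ | ⟨p, ps⟩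
        · simp [List.modifyHead]
        · simp [List.modifyHead]

theorem splitOn_eq_mySplit (l : List Char) :
    PySem.Chars.splitOn l pvFill = mySplit l := by
  rw [PySem.Chars.splitOn, go_eq (l.length + 1) l [] [] (by omega)]
  rcases h : mySplit l with _ | ⟨p, ps⟩
  · exact absurd h (mySplit_ne_nil _)
  · simp [List.modifyHead]

-- how both programs interleave the parts with sentinels k, k+1, …
def itl : List (List Char) → Int → List Char
  | [], _ => []
  | [p], _ => p
  | p :: q :: ps, k => p ++ make_sentinel_incoder k ++ itl (q :: ps) (k + 1)

theorem itl_modifyHead (c : Char) (ps : List (List Char)) (k : Int) (h : ps ≠ []) :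
    itl (ps.modifyHead (c :: ·)) k = c :: itl ps k := by
  rcases ps with _ | ⟨p, _ | ⟨q, ps'⟩⟩
  · exact absurd rfl h
  · simp [List.modifyHead, itl]
  · simp [List.modifyHead, itl]

theorem scan_eq_itl (l : List Char) (k : Int) : pvScan l k = itl (mySplit l) k := by
  induction l, k using pvScan.induct with
  | case1 k => simp [pvScan_nil, mySplit_nil, itl]
  | case2 k c rest hp ih =>
    rw [pvScan_cons, if_pos hp, ih, mySplit_cons,
      if_pos ((List.isPrefixOf_iff_prefix).mpr ((PySem.Chars.startswith_iff _ _).mp hp))]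
    rcases hq : mySplit (List.drop pvFill.length (c :: rest)) with _ | ⟨p, ps⟩
    · exact absurd hq (mySplit_ne_nil _)
    · simp [itl]
  | case3 k c rest hp ih =>
    rw [pvScan_cons, if_neg hp, ih, mySplit_cons,
      if_neg (fun hpre => hp ((PySem.Chars.startswith_iff _ _).mpr ((List.isPrefixOf_iff_prefix).mp hpre)))]
    exact (itl_modifyHead c _ k (mySplit_ne_nil rest)).symm

theorem foldA (n : Int) (ps : List (List Char)) : ∀ (j : Int) (acc : List Char),
    j + ps.length = n →
    (PySem.List.enumerate ps j).foldl (fun prompt p =>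
        let prompt := prompt ++ p.2
        if p.1 < n - 1 then prompt ++ make_sentinel_incoder p.1 else prompt) acc
      = acc ++ itl ps j := by
  induction ps with
  | nil => intro j acc _; simp [PySem.List.enumerate, itl]
  | cons p ps ih =>
    intro j acc h
    rw [PySem.List.enumerate]
    rcases ps with _ | ⟨q, ps'⟩
    · have hj : ¬ (j < n - 1) := by simp at h; omega
      simp [List.foldl, PySem.List.enumerate, hj, itl]
    · have hj : j < n - 1 := by simp at h; omega
      simp only [List.foldl, hj, if_pos]
      rw [ih (j + 1) _ (by simp at h ⊢; omega)]
      simp [itl]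

theorem per_text (text : String) :
    (let parts := PySem.Chars.splitOn text.toList "<FILL_ME>".toList
     (PySem.List.enumerate parts).foldl (fun prompt p =>
        let prompt := prompt ++ p.2
        if p.1 < (parts.length : Int) - 1 then prompt ++ make_sentinel_incoder p.1
        else prompt) [])
      = pvScan text.toList 0 := by
  show (PySem.List.enumerate (PySem.Chars.splitOn text.toList "<FILL_ME>".toList)).foldl _ [] = _
  have hs : PySem.Chars.splitOn text.toList "<FILL_ME>".toList = mySplit text.toList := by
    have : "<FILL_ME>".toList = pvFill := rfl
    rw [this, splitOn_eq_mySplit]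
  rw [hs, foldA ((mySplit text.toList).length : Int) (mySplit text.toList) 0 [] (by omega),
    scan_eq_itl]
  simp

-- ===== VERDICT (by name: the statement is the Claim_ definition above) =====
theorem process_incoder_fill_spec : Claim_equal_process_incoder_fill := by
  intro text_list _
  unfold Spec_process_incoder_fill process_incoder_fill process_incoder_fill_alt
  rw [PySem.List.foldl_append_singleton_eq_map, PySem.List.foldl_append_singleton_eq_map]
  exact List.map_congr_left (fun text _ => by rw [per_text text])
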